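-- pv_equiv track=rewrite | github.com/debbie-drg/advent-of-code-2024 | Day07/day07.py | sum_valid
-- ===== SOURCE A (Python) =====
-- DECIMAL_REP = [int(float(f"1e{i}")) for i in range(16)]
--
-- def concatenate(left_side: int, right_side: int) -> int:
--     for element in DECIMAL_REP:
--         if element > right_side:
--             return left_side * element + right_side
--     return 0
--
-- def is_valid(goal: int, result: int, remaining: list[int], concatenation: bool):
--     if not remaining:
--         return goal == result
--     current = remaining[0]
--     if is_valid(goal, result + current, remaining[1:], concatenation):
--         return True
--     if is_valid(goal, result * current, remaining[1:], concatenation):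
--         return True
--     if concatenation and is_valid(
--         goal, concatenate(result, current), remaining[1:], concatenation
--     ):
--         return True
--     return False
--
-- def is_valid_equation(
--     equation: tuple[int, list[int]], concatenation: bool = False
-- ) -> bool:
--     goal, numbers = equation
--     return is_valid(goal, 0, numbers, concatenation)
--
-- def sum_valid(equations: list[tuple[int, list[int]]]) -> tuple[int, int]:
--     remaining = []
--     valid_sum = 0
--     for equation in equations:
--         if is_valid_equation(equation):
--             valid_sum += equation[0]
--         else:
--             remaining.append(equation)
--     with_concatenation = sum(
--         [equation[0] for equation in remaining if is_valid_equation(equation, True)]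
--     )
--     return valid_sum, valid_sum + with_concatenation
-- ===== SOURCE B (Python) =====
-- DECIMAL_REP = [int(float(f"1e{i}")) for i in range(16)]
--
-- def _concat(left_side, right_side):
--     for element in DECIMAL_REP:
--         if element > right_side:
--             return left_side * element + right_side
--     return 0
--
-- def _reachable(numbers, concatenation):
--     values = {0}
--     for n in numbers:
--         nxt = set()
--         for v in values:
--             nxt.add(v + n)
--             nxt.add(v * n)
--             if concatenation:
--                 nxt.add(_concat(v, n))
--         values = nxt
--     return values
--
-- def sum_valid(equations):
--     plain = 0
--     total = 0
--     for goal, numbers in equations: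
--         if goal in _reachable(numbers, False):
--             plain += goal
--             total += goal
--         elif goal in _reachable(numbers, True):
--             total += goal
--     return plain, total
-- ===== Notes on version B (the rewrite author's own statement) =====
-- stated objective: alternative
-- what changed: Replaces the ternary recursive DFS per equation by an iterative breadth-first fold that maintains the deduplicated set of all reachable intermediate values and tests goal membership, folding both answer components in one pass over the equations.
import Mathlib
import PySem

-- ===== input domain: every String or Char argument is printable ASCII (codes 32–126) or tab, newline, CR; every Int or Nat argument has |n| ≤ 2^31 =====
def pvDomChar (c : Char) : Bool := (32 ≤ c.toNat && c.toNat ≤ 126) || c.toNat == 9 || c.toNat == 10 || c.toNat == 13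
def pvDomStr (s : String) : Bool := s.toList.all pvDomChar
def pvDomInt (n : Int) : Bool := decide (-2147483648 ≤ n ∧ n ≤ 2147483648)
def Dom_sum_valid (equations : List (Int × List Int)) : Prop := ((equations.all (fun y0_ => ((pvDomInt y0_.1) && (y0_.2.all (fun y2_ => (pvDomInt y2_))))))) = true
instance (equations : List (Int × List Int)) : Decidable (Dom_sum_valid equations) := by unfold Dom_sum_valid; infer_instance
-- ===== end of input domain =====

-- B replaces the per-equation ternary DFS recursion by an iterative fold that maintains the
-- deduplicated set of reachable intermediate values; return values are proved equal on all inputs.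

-- ===== PORT A =====
def DECIMAL_REP : List Int :=
  [1, 10, 100, 1000, 10000, 100000, 1000000, 10000000, 100000000, 1000000000,
   10000000000, 100000000000, 1000000000000, 10000000000000, 100000000000000,
   1000000000000000]

-- the 'for element in DECIMAL_REP: if element > right_side: return …' loop
def concatLoop (left_side right_side : Int) : List Int → Int
  | [] => 0
  | element :: rest =>
      if element > right_side then left_side * element + right_side
      else concatLoop left_side right_side rest

def concatenate (left_side right_side : Int) : Int :=
  concatLoop left_side right_side DECIMAL_REP

def is_valid (goal result : Int) (remaining : List Int) (concatenation : Bool) : Bool :=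
  match remaining with
  | [] => goal == result
  | current :: rest =>
      is_valid goal (result + current) rest concatenation ||
      (is_valid goal (result * current) rest concatenation ||
       (concatenation && is_valid goal (concatenate result current) rest concatenation))

def is_valid_equation (equation : Int × List Int) (concatenation : Bool) : Bool :=
  is_valid equation.1 0 equation.2 concatenation

def sum_valid (equations : List (Int × List Int)) : Int × Int :=
  let p := equations.foldl
      (fun acc equation =>
        if is_valid_equation equation false then (acc.1 + equation.1, acc.2)
        else (acc.1, acc.2 ++ [equation]))
      ((0 : Int), ([] : List (Int × List Int)))
  let with_concatenation :=
    ((p.2.filter (fun equation => is_valid_equation equation true)).map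
        (fun equation => equation.1)).foldl (· + ·) 0
  (p.1, p.1 + with_concatenation)

-- ===== PORT B =====
def altDecimalRep : List Int :=
  [1, 10, 100, 1000, 10000, 100000, 1000000, 10000000, 100000000, 1000000000,
   10000000000, 100000000000, 1000000000000, 10000000000000, 100000000000000,
   1000000000000000]

def altConcatLoop (left_side right_side : Int) : List Int → Int
  | [] => 0
  | element :: rest =>
      if element > right_side then left_side * element + right_side
      else altConcatLoop left_side right_side rest

def altConcat (left_side right_side : Int) : Int :=
  altConcatLoop left_side right_side altDecimalRep

-- one step of '_reachable': the new set of values after folding in the next number n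
def reachStep (concatenation : Bool) (values : PySem.Set Int) (n : Int) : PySem.Set Int :=
  values.foldl
    (fun nxt v =>
      let nxt := PySem.Set.add nxt (v + n)
      let nxt := PySem.Set.add nxt (v * n)
      if concatenation then PySem.Set.add nxt (altConcat v n) else nxt)
    PySem.Set.empty

def reachable (numbers : List Int) (concatenation : Bool) : PySem.Set Int :=
  numbers.foldl (reachStep concatenation) (PySem.Set.ofList [0])

def sum_valid_alt (equations : List (Int × List Int)) : Int × Int :=
  equations.foldl
    (fun acc eq =>
      if PySem.Set.contains (reachable eq.2 false) eq.1 then (acc.1 + eq.1, acc.2 + eq.1)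
      else if PySem.Set.contains (reachable eq.2 true) eq.1 then (acc.1, acc.2 + eq.1)
      else acc)
    ((0 : Int), (0 : Int))

-- ===== PRECONDITION & SPEC =====
def Spec_sum_valid (equations : List (Int × List Int)) (out : Int × Int) : Prop := out = sum_valid_alt equations
instance (equations : List (Int × List Int)) (out : Int × Int) : Decidable (Spec_sum_valid equations out) := by unfold Spec_sum_valid; infer_instance

-- ===== CLAIM (what is proved, stated in full; the proofs are below) =====
def Claim_equal_sum_valid : Prop := ∀ (equations : List (Int × List Int)), Dom_sum_valid equations → Spec_sum_valid equations (sum_valid equations)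

-- ===== LEMMAS AND PROOFS =====

theorem altConcatLoop_eq (l r : Int) (xs : List Int) : altConcatLoop l r xs = concatLoop l r xs := by
  induction xs with
  | nil => rfl
  | cons e rest ih => simp [altConcatLoop, concatLoop, ih]

theorem altConcat_eq (l r : Int) : altConcat l r = concatenate l r := by
  simp [altConcat, concatenate, altConcatLoop_eq, altDecimalRep, DECIMAL_REP]

-- the list of all values reachable from `result` over `remaining`
def allVals (result : Int) (remaining : List Int) (c : Bool) : List Int :=
  match remaining with
  | [] => [result]
  | n :: rest =>
      allVals (result + n) rest c ++ allVals (result * n) rest c ++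
        (if c then allVals (concatenate result n) rest c else [])

theorem is_valid_iff (g : Int) (rem : List Int) (c : Bool) :
    ∀ r, is_valid g r rem c = true ↔ g ∈ allVals r rem c := by
  induction rem with
  | nil =>
      intro r
      show (g == r) = true ↔ g ∈ [r]
      simp only [beq_iff_eq, List.mem_singleton]
  | cons n rest ih =>
      intro r
      have h1 : is_valid g r (n :: rest) c =
          (is_valid g (r + n) rest c ||
            (is_valid g (r * n) rest c ||
             (c && is_valid g (concatenate r n) rest c))) := rfl
      have h2 : allVals r (n :: rest) c =
          allVals (r + n) rest c ++ allVals (r * n) rest c ++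
            (if c then allVals (concatenate r n) rest c else []) := rfl
      rw [h1, h2]
      cases c <;> simp [ih]

theorem mem_reachStep (c : Bool) (S : PySem.Set Int) (n x : Int) :
    x ∈ reachStep c S n ↔ ∃ v ∈ S, x = v + n ∨ x = v * n ∨ (c = true ∧ x = altConcat v n) := by
  cases c with
  | false =>
      have key : ∀ (L : List Int) (acc : PySem.Set Int),
          x ∈ L.foldl (fun nxt v => PySem.Set.add (PySem.Set.add nxt (v + n)) (v * n)) acc ↔
          x ∈ acc ∨ ∃ v ∈ L, x = v + n ∨ x = v * n := by
        intro L
        induction L with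
        | nil => simp
        | cons v L ih =>
            intro acc
            simp only [List.foldl_cons, ih, PySem.Set.mem_add, List.mem_cons]
            aesop
      simp only [reachStep, Bool.false_eq_true, if_false, false_and, or_false]
      have := key S PySem.Set.empty
      simpa [PySem.Set.empty] using this
  | true =>
      have key : ∀ (L : List Int) (acc : PySem.Set Int),
          x ∈ L.foldl (fun nxt v =>
              PySem.Set.add (PySem.Set.add (PySem.Set.add nxt (v + n)) (v * n)) (altConcat v n)) acc ↔
          x ∈ acc ∨ ∃ v ∈ L, x = v + n ∨ x = v * n ∨ x = altConcat v n := by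
        intro L
        induction L with
        | nil => simp
        | cons v L ih =>
            intro acc
            simp only [List.foldl_cons, ih, PySem.Set.mem_add, List.mem_cons]
            aesop
      simp only [reachStep, if_true, true_and]
      have := key S PySem.Set.empty
      simpa [PySem.Set.empty] using this

theorem mem_foldl_reachStep (c : Bool) (g : Int) :
    ∀ (ns : List Int) (S : PySem.Set Int),
      g ∈ ns.foldl (reachStep c) S ↔ ∃ v ∈ S, g ∈ allVals v ns c := by
  intro ns
  induction ns with
  | nil =>
      intro S
      constructor
      · intro h; exact ⟨g, h, by show g ∈ [g]; simp⟩
      · rintro ⟨v, hv, hmem⟩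
        have : g ∈ [v] := hmem
        simp at this
        exact this ▸ hv
  | cons n rest ih =>
      intro S
      rw [List.foldl_cons, ih]
      have hAll : ∀ v : Int, g ∈ allVals v (n :: rest) c ↔
          (g ∈ allVals (v + n) rest c ∨ g ∈ allVals (v * n) rest c ∨
            (c = true ∧ g ∈ allVals (altConcat v n) rest c)) := by
        intro v
        have h2 : allVals v (n :: rest) c =
            allVals (v + n) rest c ++ allVals (v * n) rest c ++
              (if c then allVals (concatenate v n) rest c else []) := rfl
        rw [h2, ← altConcat_eq]
        cases c <;> simp
      constructor
      · rintro ⟨w, hw, hmem⟩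
        rw [mem_reachStep] at hw
        rcases hw with ⟨v, hv, h | h | ⟨hc, h⟩⟩
        · exact ⟨v, hv, (hAll v).2 (Or.inl (h ▸ hmem))⟩
        · exact ⟨v, hv, (hAll v).2 (Or.inr (Or.inl (h ▸ hmem)))⟩
        · exact ⟨v, hv, (hAll v).2 (Or.inr (Or.inr ⟨hc, h ▸ hmem⟩))⟩
      · rintro ⟨v, hv, hmem⟩
        rcases (hAll v).1 hmem with h | h | ⟨hc, h⟩
        · exact ⟨v + n, (mem_reachStep c S n (v + n)).2 ⟨v, hv, Or.inl rfl⟩, h⟩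
        · exact ⟨v * n, (mem_reachStep c S n (v * n)).2 ⟨v, hv, Or.inr (Or.inl rfl)⟩, h⟩
        · exact ⟨altConcat v n,
            (mem_reachStep c S n (altConcat v n)).2 ⟨v, hv, Or.inr (Or.inr ⟨hc, rfl⟩)⟩, h⟩

theorem contains_reachable (g : Int) (ns : List Int) (c : Bool) :
    PySem.Set.contains (reachable ns c) g = is_valid g 0 ns c := by
  rw [Bool.eq_iff_iff, PySem.Set.contains_iff, is_valid_iff, reachable, mem_foldl_reachStep]
  constructor
  · rintro ⟨v, hv, h⟩
    simp only [PySem.Set.mem_ofList, List.mem_singleton] at hv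
    exact hv ▸ h
  · intro h; exact ⟨0, by simp [PySem.Set.mem_ofList], h⟩

def concsum (rem : List (Int × List Int)) : Int :=
  ((rem.filter (fun equation => is_valid_equation equation true)).map
      (fun equation => equation.1)).foldl (· + ·) 0

theorem concsum_append (rem : List (Int × List Int)) (e : Int × List Int) :
    concsum (rem ++ [e]) =
      if is_valid_equation e true then concsum rem + e.1 else concsum rem := by
  unfold concsum
  split <;> simp_all [List.filter_append, List.foldl_append]

theorem main_fold (eqs : List (Int × List Int)) :
    ∀ (vs : Int) (rem : List (Int × List Int)),
      eqs.foldl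
        (fun acc eq =>
          if is_valid eq.1 0 eq.2 false then (acc.1 + eq.1, acc.2 + eq.1)
          else if is_valid eq.1 0 eq.2 true then (acc.1, acc.2 + eq.1)
          else acc)
        (vs, vs + concsum rem) =
      ((eqs.foldl
          (fun acc equation =>
            if is_valid_equation equation false then (acc.1 + equation.1, acc.2)
            else (acc.1, acc.2 ++ [equation]))
          (vs, rem)).1,
        (eqs.foldl
          (fun acc equation =>
            if is_valid_equation equation false then (acc.1 + equation.1, acc.2)
            else (acc.1, acc.2 ++ [equation]))
          (vs, rem)).1 +
        concsum (eqs.foldl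
          (fun acc equation =>
            if is_valid_equation equation false then (acc.1 + equation.1, acc.2)
            else (acc.1, acc.2 ++ [equation]))
          (vs, rem)).2) := by
  induction eqs with
  | nil => intro vs rem; rfl
  | cons e rest ih =>
      intro vs rem
      simp only [List.foldl_cons]
      by_cases h1 : is_valid e.1 0 e.2 false = true
      · rw [if_pos h1, if_pos (show is_valid_equation e false = true from h1)]
        have harith : vs + concsum rem + e.1 = (vs + e.1) + concsum rem := by ring
        simp only [harith]
        exact ih (vs + e.1) rem
      · rw [if_neg h1, if_neg (show ¬ is_valid_equation e false = true from h1)]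
        by_cases h2 : is_valid e.1 0 e.2 true = true
        · rw [if_pos h2]
          have harith : vs + concsum rem + e.1 = vs + concsum (rem ++ [e]) := by
            rw [concsum_append, if_pos (show is_valid_equation e true = true from h2)]; ring
          simp only [harith]
          exact ih vs (rem ++ [e])
        · have harith : vs + concsum rem = vs + concsum (rem ++ [e]) := by
            rw [concsum_append, if_neg (show ¬ is_valid_equation e true = true from h2)]
          rw [if_neg h2]
          simp only [harith]
          exact ih vs (rem ++ [e])

-- ===== VERDICT (by name: the statement is the Claim_ definition above) =====
theorem sum_valid_spec : Claim_equal_sum_valid := by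
  intro equations _
  unfold Spec_sum_valid sum_valid sum_valid_alt
  simp only [contains_reachable]
  have h := main_fold equations 0 []
  simpa [concsum] using h.symm
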